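-- pv_equiv track=rewrite | github.com/zaidalyafeai/drawing | animation.py | convert_format_normalized
-- ===== SOURCE A (Python) =====
-- def convert_format_normalized(drawing):
--     new_data = []
--     xs = []
--     ys = []
--     x_prev, y_prev, _ = drawing[0]
--
--     for x, y, z in drawing[1:]:
--         xs.append(-(x + x_prev))
--         ys.append(y + y_prev)
--         if z:
--           new_data.append([xs, ys])
--           xs = []
--           ys = []
--
--         x_prev = x + x_prev
--         y_prev = y + y_prev
--     return new_data
-- ===== SOURCE B (Python) =====
-- def convert_format_normalized(drawing):
--     # Phase 1: one prefix-sum pass building the full coordinate arrays.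
--     x0, y0, _ = drawing[0]
--     negx = []
--     cumy = []
--     cx, cy = x0, y0
--     for x, y, _ in drawing[1:]:
--         cx += x
--         cy += y
--         negx.append(-cx)
--         cumy.append(cy)
--     # Phase 2: slice the precomputed arrays at every truthy z flag.
--     # A trailing segment after the last truthy z is deliberately not emitted.
--     new_data = []
--     start = 0
--     for i, (_, _, z) in enumerate(drawing[1:]):
--         if z:
--             new_data.append([negx[start:i + 1], cumy[start:i + 1]])
--             start = i + 1
--     return new_data
-- ===== Notes on version B (the rewrite author's own statement) =====
-- stated objective: alternative
-- what changed: A interleaves accumulation, stroke building and flushing in one loop with mutable pending lists; B first materialises the full cumulative coordinate arrays in a prefix-sum pass and then, in a separate pass, slices those arrays into stroke groups at each truthy z flag.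
import Mathlib
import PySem

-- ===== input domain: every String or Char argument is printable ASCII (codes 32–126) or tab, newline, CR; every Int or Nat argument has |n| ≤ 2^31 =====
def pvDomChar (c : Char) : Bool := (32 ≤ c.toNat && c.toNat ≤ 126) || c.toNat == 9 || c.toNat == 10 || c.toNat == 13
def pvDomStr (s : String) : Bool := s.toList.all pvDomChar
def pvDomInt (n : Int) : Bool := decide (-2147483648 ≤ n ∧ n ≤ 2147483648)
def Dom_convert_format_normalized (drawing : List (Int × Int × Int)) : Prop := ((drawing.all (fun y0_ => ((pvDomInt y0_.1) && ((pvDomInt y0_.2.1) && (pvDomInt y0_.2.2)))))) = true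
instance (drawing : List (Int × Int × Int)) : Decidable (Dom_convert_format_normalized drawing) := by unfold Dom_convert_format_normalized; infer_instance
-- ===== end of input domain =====

-- B replaces A's single loop (mutable pending xs/ys flushed on each truthy z) by a
-- prefix-sum pass building the full coordinate arrays followed by a separate slicing
-- pass; same cost, different decomposition.  Neither program mutates its argument.

-- ===== PORT A =====
-- A's loop body over drawing[1:], state (new_data, xs, ys, x_prev, y_prev).
def pvStepA (s : List (List (List Int)) × List Int × List Int × Int × Int)
    (p : Int × Int × Int) : List (List (List Int)) × List Int × List Int × Int × Int :=
  let xs := s.2.1 ++ [-(p.1 + s.2.2.2.1)]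
  let ys := s.2.2.1 ++ [p.2.1 + s.2.2.2.2]
  if p.2.2 ≠ 0 then
    (s.1 ++ [[xs, ys]], [], [], p.1 + s.2.2.2.1, p.2.1 + s.2.2.2.2)
  else
    (s.1, xs, ys, p.1 + s.2.2.2.1, p.2.1 + s.2.2.2.2)

def convert_format_normalized (drawing : List (Int × Int × Int)) : List (List (List Int)) :=
  match drawing with
  | [] => []   -- unreachable: drawing[0] raises IndexError, excluded by Pre_
  | (x0, y0, _) :: rest => (rest.foldl pvStepA ([], [], [], x0, y0)).1

-- ===== PORT B =====
-- Phase 1 of B: prefix sums building (negx, cumy, cx, cy).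
def pvStepB1 (s : List Int × List Int × Int × Int) (p : Int × Int × Int) :
    List Int × List Int × Int × Int :=
  (s.1 ++ [-(s.2.2.1 + p.1)], s.2.1 ++ [s.2.2.2 + p.2.1], s.2.2.1 + p.1, s.2.2.2 + p.2.1)

-- Phase 2 of B: slice the arrays at each truthy z flag, state (new_data, start).
-- negx[start:i+1] is ported as (negx.drop start).take (i+1-start), exact here since
-- 0 ≤ start ≤ i+1 always holds for Python's slice with these Nat bounds.
def pvStepB2 (nx cy : List Int) (s : List (List (List Int)) × Nat)
    (pi : (Int × Int × Int) × Nat) : List (List (List Int)) × Nat :=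
  if pi.1.2.2 ≠ 0 then
    (s.1 ++ [[(nx.drop s.2).take (pi.2 + 1 - s.2), (cy.drop s.2).take (pi.2 + 1 - s.2)]],
     pi.2 + 1)
  else s

def convert_format_normalized_alt (drawing : List (Int × Int × Int)) : List (List (List Int)) :=
  match drawing with
  | [] => []   -- unreachable: drawing[0] raises IndexError, excluded by Pre_
  | (x0, y0, _) :: rest =>
    let ph1 := rest.foldl pvStepB1 ([], [], x0, y0)
    ((rest.zipIdx).foldl (pvStepB2 ph1.1 ph1.2.1) ([], 0)).1

-- ===== PRECONDITION & SPEC =====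
-- Pre_ excludes only the empty list, on which A (drawing[0]) raises IndexError.
def Pre_convert_format_normalized (drawing : List (Int × Int × Int)) : Prop := drawing ≠ []
instance (drawing : List (Int × Int × Int)) : Decidable (Pre_convert_format_normalized drawing) := by unfold Pre_convert_format_normalized; infer_instance
def pvWitness_convert_format_normalized : (List (Int × Int × Int)) := [(1, 2, 0), (3, 4, 1)]
def Spec_convert_format_normalized (drawing : List (Int × Int × Int)) (out : List (List (List Int))) : Prop := out = convert_format_normalized_alt drawing
instance (drawing : List (Int × Int × Int)) (out : List (List (List Int))) : Decidable (Spec_convert_format_normalized drawing out) := by unfold Spec_convert_format_normalized; infer_instance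

-- ===== CLAIM (what is proved, stated in full; the proofs are below) =====
def Claim_equal_convert_format_normalized : Prop := ∀ (drawing : List (Int × Int × Int)), Dom_convert_format_normalized drawing → Pre_convert_format_normalized drawing → Spec_convert_format_normalized drawing (convert_format_normalized drawing)

-- ===== LEMMAS AND PROOFS =====

-- Common specification: split a list of ((negx, cumy), z) points into strokes.
def pvSeg : List ((Int × Int) × Int) → List Int → List Int → List (List (List Int))
  | [], _, _ => []
  | ((a, b), z) :: t, xs, ys =>
      if z ≠ 0 then [xs ++ [a], ys ++ [b]] :: pvSeg t [] []
      else pvSeg t (xs ++ [a]) (ys ++ [b])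

-- Cumulative points of the tail, seeded by (xp, yp).
def pvCums : List (Int × Int × Int) → Int → Int → List ((Int × Int) × Int)
  | [], _, _ => []
  | (x, y, z) :: t, xp, yp => ((-(x + xp), y + yp), z) :: pvCums t (x + xp) (y + yp)

-- pvSeg driven by two parallel coordinate lists and the z flags of the tail.
def pvSegT : List Int → List Int → List (Int × Int × Int) → List Int → List Int → List (List (List Int))
  | a :: as, b :: bs, (_, _, z) :: t, xs, ys =>
      if z ≠ 0 then [xs ++ [a], ys ++ [b]] :: pvSegT as bs t [] []
      else pvSegT as bs t (xs ++ [a]) (ys ++ [b])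
  | _, _, _, _, _ => []

theorem pvCums_length (t : List (Int × Int × Int)) (xp yp : Int) :
    (pvCums t xp yp).length = t.length := by
  induction t generalizing xp yp with
  | nil => rfl
  | cons p t ih => obtain ⟨x, y, z⟩ := p; simp [pvCums, ih]

-- A's fold leaves new_data = nd ++ pvSeg (pvCums rest xp yp) xs ys.
theorem foldA_eq (rest : List (Int × Int × Int)) :
    ∀ (nd : List (List (List Int))) (xs ys : List Int) (xp yp : Int),
    (rest.foldl pvStepA (nd, xs, ys, xp, yp)).1 = nd ++ pvSeg (pvCums rest xp yp) xs ys := by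
  induction rest with
  | nil => intro nd xs ys xp yp; simp [pvCums, pvSeg]
  | cons p t ih =>
    intro nd xs ys xp yp
    obtain ⟨x, y, z⟩ := p
    by_cases hz : z ≠ 0
    · have h1 : pvStepA (nd, xs, ys, xp, yp) (x, y, z)
          = (nd ++ [[xs ++ [-(x + xp)], ys ++ [y + yp]]], [], [], x + xp, y + yp) := by
        simp [pvStepA, hz]
      rw [List.foldl_cons, h1, ih]
      simp [pvCums, pvSeg, hz, List.append_assoc]
    · have h1 : pvStepA (nd, xs, ys, xp, yp) (x, y, z)
          = (nd, xs ++ [-(x + xp)], ys ++ [y + yp], x + xp, y + yp) := by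
        simp [pvStepA, hz]
      rw [List.foldl_cons, h1, ih]
      simp [pvCums, pvSeg, hz]

-- B's phase-1 fold builds the map projections of pvCums.
theorem foldB1_eq (rest : List (Int × Int × Int)) :
    ∀ (nx cy : List Int) (xp yp : Int),
    (rest.foldl pvStepB1 (nx, cy, xp, yp)).1 = nx ++ (pvCums rest xp yp).map (·.1.1) ∧
    (rest.foldl pvStepB1 (nx, cy, xp, yp)).2.1 = cy ++ (pvCums rest xp yp).map (·.1.2) := by
  induction rest with
  | nil => intro nx cy xp yp; simp [pvCums]
  | cons p t ih =>
    intro nx cy xp yp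
    obtain ⟨x, y, z⟩ := p
    have h1 : pvStepB1 (nx, cy, xp, yp) (x, y, z)
        = (nx ++ [-(x + xp)], cy ++ [y + yp], x + xp, y + yp) := by
      simp only [pvStepB1, Prod.mk.injEq]
      refine ⟨by ring_nf, by ring_nf, by ring, by ring⟩
    have h := ih (nx ++ [-(x + xp)]) (cy ++ [y + yp]) (x + xp) (y + yp)
    rw [List.foldl_cons, h1]
    constructor
    · rw [h.1]; simp [pvCums, List.append_assoc]
    · rw [h.2]; simp [pvCums, List.append_assoc]

-- B's phase-2 fold, started at index k with last flush at s, appends exactly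
-- the remaining strokes, the pending segment being the slice [s:k).
theorem foldB2_eq (nx cy : List Int) :
    ∀ (t : List (Int × Int × Int)) (k s : Nat) (out : List (List (List Int))),
    s ≤ k → k + t.length ≤ nx.length → k + t.length ≤ cy.length →
    ((t.zipIdx k).foldl (pvStepB2 nx cy) (out, s)).1
      = out ++ pvSegT (nx.drop k) (cy.drop k) t
          ((nx.drop s).take (k - s)) ((cy.drop s).take (k - s)) := by
  intro t
  induction t with
  | nil => intro k s out _ _ _; simp [pvSegT]
  | cons p t ih =>
    intro k s out hsk hnx hcy
    obtain ⟨x, y, z⟩ := p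
    have hk : k < nx.length := by simp at hnx; omega
    have hk' : k < cy.length := by simp at hcy; omega
    have hdx : nx.drop k = nx[k] :: nx.drop (k + 1) := List.drop_eq_getElem_cons hk
    have hdy : cy.drop k = cy[k] :: cy.drop (k + 1) := List.drop_eq_getElem_cons hk'
    have hslx : (nx.drop s).take (k + 1 - s) = (nx.drop s).take (k - s) ++ [nx[k]] := by
      have h1 : k + 1 - s = (k - s) + 1 := by omega
      have h2 : (nx.drop s)[k - s]? = some nx[k] := by
        rw [List.getElem?_drop]
        have h3 : s + (k - s) = k := by omega
        rw [h3, List.getElem?_eq_getElem hk]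
      rw [h1, List.take_add_one, h2]; rfl
    have hsly : (cy.drop s).take (k + 1 - s) = (cy.drop s).take (k - s) ++ [cy[k]] := by
      have h1 : k + 1 - s = (k - s) + 1 := by omega
      have h2 : (cy.drop s)[k - s]? = some cy[k] := by
        rw [List.getElem?_drop]
        have h3 : s + (k - s) = k := by omega
        rw [h3, List.getElem?_eq_getElem hk']
      rw [h1, List.take_add_one, h2]; rfl
    rw [List.zipIdx_cons, List.foldl_cons]
    by_cases hz : z ≠ 0
    · have h1 : pvStepB2 nx cy (out, s) ((x, y, z), k)
          = (out ++ [[(nx.drop s).take (k + 1 - s), (cy.drop s).take (k + 1 - s)]], k + 1) := by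
        simp [pvStepB2, hz]
      rw [h1, ih (k + 1) (k + 1) _ (le_refl _) (by simp at hnx ⊢; omega) (by simp at hcy ⊢; omega)]
      rw [hdx, hdy]
      simp [pvSegT, hz, hslx, hsly, List.append_assoc]
    · have h1 : pvStepB2 nx cy (out, s) ((x, y, z), k) = (out, s) := by
        simp [pvStepB2, hz]
      rw [h1, ih (k + 1) s _ (by omega) (by simp at hnx ⊢; omega) (by simp at hcy ⊢; omega)]
      rw [hdx, hdy]
      simp [pvSegT, hz, hslx, hsly]

-- pvSegT over the projections of pvCums is pvSeg over pvCums.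
theorem pvSegT_cums (rest : List (Int × Int × Int)) :
    ∀ (xp yp : Int) (xs ys : List Int),
    pvSegT ((pvCums rest xp yp).map (·.1.1)) ((pvCums rest xp yp).map (·.1.2)) rest xs ys
      = pvSeg (pvCums rest xp yp) xs ys := by
  induction rest with
  | nil => intro xp yp xs ys; simp [pvCums, pvSegT, pvSeg]
  | cons p t ih =>
    intro xp yp xs ys
    obtain ⟨x, y, z⟩ := p
    by_cases hz : z ≠ 0 <;> simp [pvCums, pvSegT, pvSeg, hz, ih]

-- ===== VERDICT (by name: the statement is the Claim_ definition above) =====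
theorem convert_format_normalized_spec : Claim_equal_convert_format_normalized := by
  intro drawing _ hpre
  unfold Spec_convert_format_normalized
  match drawing with
  | [] => exact absurd rfl hpre
  | (x0, y0, z0) :: rest =>
    rw [convert_format_normalized, convert_format_normalized_alt]
    rw [foldA_eq rest [] [] [] x0 y0]
    have hb1 := foldB1_eq rest [] [] x0 y0
    simp only [List.nil_append] at hb1
    have hlen1 : ((pvCums rest x0 y0).map (·.1.1)).length = rest.length := by
      simp [pvCums_length]
    have hlen2 : ((pvCums rest x0 y0).map (·.1.2)).length = rest.length := by
      simp [pvCums_length]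
    rw [show rest.zipIdx = rest.zipIdx 0 from rfl]
    rw [hb1.1, hb1.2,
        foldB2_eq _ _ rest 0 0 [] (le_refl 0) (by omega) (by omega)]
    simp [pvSegT_cums]
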